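-- pv_equiv track=rewrite | github.com/brendairena/AI-KNearestNeighbor | Program_Tugas2AI_1301164641.py | calculate_class
-- ===== SOURCE A (Python) =====
-- import operator
--
-- def calculate_class(neighbors):
--     sum_votes = {}
--     for x in range(len(neighbors)):
--         response=neighbors[x][-1]
--         if response in sum_votes:
--             sum_votes[response]+=1
--         else:
--             sum_votes[response]=1
--     sorted_votes = sorted(sum_votes.items(),key=operator.itemgetter(1),reverse=True)
--     return sorted_votes[0][0]
-- ===== SOURCE B (Python) =====
-- def calculate_class(neighbors):
--     sum_votes = {}
--     for row in neighbors:
--         r = row[-1]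
--         sum_votes[r] = sum_votes.get(r, 0) + 1
--     items = list(sum_votes.items())
--     best = items[0]
--     for it in items[1:]:
--         if it[1] > best[1]:
--             best = it
--     return best[0]
-- ===== Notes on version B (the rewrite author's own statement) =====
-- stated objective: alternative
-- what changed: Replaces A's reverse stable sort of the vote counts with a single left-to-right strict-greater max scan over the dict items (first-seen tie winner preserved).
import Mathlib
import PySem

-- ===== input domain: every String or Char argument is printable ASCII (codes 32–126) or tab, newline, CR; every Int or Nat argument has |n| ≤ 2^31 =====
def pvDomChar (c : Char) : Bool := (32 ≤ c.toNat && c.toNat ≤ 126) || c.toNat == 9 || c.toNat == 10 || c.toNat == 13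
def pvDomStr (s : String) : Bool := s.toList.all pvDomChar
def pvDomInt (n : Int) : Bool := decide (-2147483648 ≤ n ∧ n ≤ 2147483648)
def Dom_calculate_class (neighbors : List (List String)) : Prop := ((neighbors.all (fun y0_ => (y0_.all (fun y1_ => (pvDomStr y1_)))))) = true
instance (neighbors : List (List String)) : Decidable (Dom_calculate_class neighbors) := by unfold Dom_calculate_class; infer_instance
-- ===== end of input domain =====

-- B replaces A's reverse stable sort of the vote counts by a single strict-greater max scan over the dict items; same result.


-- ===== PORT A =====
def calculate_class (neighbors : List (List String)) : String :=
  let sum_votes :=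
    (PySem.List.pyRange 0 (PySem.List.len neighbors) 1).foldl
      (fun d x =>
        let response := PySem.List.pyGetD (PySem.List.pyGetD neighbors x []) (-1) ""
        if d.contains response then d.insert response (d.getD response 0 + 1)
        else d.insert response 1)
      (PySem.Dict.empty : PySem.Dict String Int)
  let sorted_votes := PySem.List.sorted sum_votes.items (fun p => p.2) true
  (PySem.List.pyGetD sorted_votes 0 ("", 0)).1

-- ===== PORT B =====
def calculate_class_alt (neighbors : List (List String)) : String :=
  let sum_votes :=
    neighbors.foldl
      (fun d row =>
        let r := PySem.List.pyGetD row (-1) ""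
        d.insert r (d.getD r 0 + 1))
      (PySem.Dict.empty : PySem.Dict String Int)
  let items := sum_votes.items
  let best := PySem.List.pyGetD items 0 ("", 0)
  (items.drop 1).foldl (fun b it => if it.2 > b.2 then it else b) best |>.1

-- ===== PRECONDITION & SPEC =====
-- Pre_ excludes exactly the inputs where Python A raises IndexError: an empty neighbor list
-- (sorted_votes[0]) or a neighbor row that is empty (neighbors[x][-1]).
def Pre_calculate_class (neighbors : List (List String)) : Prop :=
  neighbors ≠ [] ∧ ∀ row ∈ neighbors, row ≠ []
instance (neighbors : List (List String)) : Decidable (Pre_calculate_class neighbors) := by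
  unfold Pre_calculate_class; infer_instance
def pvWitness_calculate_class : List (List String) := [["1.2", "a"], ["3.4", "b"], ["5.6", "a"]]
def Spec_calculate_class (neighbors : List (List String)) (out : String) : Prop := out = calculate_class_alt neighbors
instance (neighbors : List (List String)) (out : String) : Decidable (Spec_calculate_class neighbors out) := by unfold Spec_calculate_class; infer_instance

-- ===== CLAIM (what is proved, stated in full; the proofs are below) =====
def Claim_equal_calculate_class : Prop := ∀ (neighbors : List (List String)), Dom_calculate_class neighbors → Pre_calculate_class neighbors → Spec_calculate_class neighbors (calculate_class neighbors)

-- ===== LEMMAS AND PROOFS =====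

-- A's branching counter step is the unconditional get-then-insert step B uses.
theorem stepA_collapse (d : PySem.Dict String Int) (r : String) :
    (if d.contains r then d.insert r (d.getD r 0 + 1) else d.insert r 1) =
      d.insert r (d.getD r 0 + 1) := by
  by_cases h : d.contains r = true
  · simp [h]
  · simp only [Bool.not_eq_true] at h
    simp [h, PySem.Dict.getD_of_not_contains d 0 h]

-- the counting dict is nonempty once one row has been folded in
theorem items_foldl_ne_nil (l : List (List String)) (d : PySem.Dict String Int)
    (hd : d.items ≠ []) :
    (l.foldl (fun d row => d.insert (PySem.List.pyGetD row (-1) "") (d.getD (PySem.List.pyGetD row (-1) "") 0 + 1)) d).items ≠ [] := by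
  induction l generalizing d with
  | nil => exact hd
  | cons h t ih =>
    apply ih
    rw [PySem.Dict.items_insert]
    split_ifs with hc
    · simpa using hd
    · simp

-- head of one reverse-order insertion is B's strict-greater selection step
theorem head?_insertBy_rev {α κ : Type} [LinearOrder κ] (key : α → κ) (x b : α) (acc : List α)
    (hb : acc.head? = some b) :
    (PySem.List.insertBy (fun a c => decide (key c < key a)) x acc).head? =
      some (if key b < key x then x else b) := by
  cases acc with
  | nil => simp at hb
  | cons y ys =>
    simp only [List.head?_cons, Option.some.injEq] at hb
    obtain rfl := hb
    by_cases h : key y < key x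
    · simp [PySem.List.insertBy, h]
    · simp [PySem.List.insertBy, h]

-- head of the insertion-sort fold is the strict-greater max scan
theorem head?_foldl_insertBy_rev {α κ : Type} [LinearOrder κ] (key : α → κ)
    (l : List α) (acc : List α) (b : α) (hb : acc.head? = some b) :
    (l.foldl (fun acc x => PySem.List.insertBy (fun a c => decide (key c < key a)) x acc) acc).head? =
      some (l.foldl (fun b x => if key b < key x then x else b) b) := by
  induction l generalizing acc b with
  | nil => simpa using hb
  | cons h t ih =>
    simp only [List.foldl_cons]
    exact ih _ _ (head?_insertBy_rev key h b acc hb)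

-- head of Python's stable reverse sort by key = first strict maximum of the list
theorem head?_sorted_rev {α κ : Type} [LinearOrder κ] (key : α → κ) (p : α) (rest : List α) :
    (PySem.List.sorted (p :: rest) key true).head? =
      some (rest.foldl (fun b x => if key b < key x then x else b) p) := by
  rw [PySem.List.sorted_rev_eq_foldl_insertBy]
  simp only [List.foldl_cons]
  exact head?_foldl_insertBy_rev key rest _ p (by simp [PySem.List.insertBy])

-- ===== VERDICT (by name: the statement is the Claim_ definition above) =====
theorem calculate_class_spec : Claim_equal_calculate_class := by
  intro neighbors _ hpre
  unfold Spec_calculate_class calculate_class calculate_class_alt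
  -- identify the two counting dicts
  simp only [stepA_collapse]
  rw [PySem.List.foldl_pyRange_zero_pyGetD neighbors []
      (fun (d : PySem.Dict String Int) (row : List String) =>
        d.insert (PySem.List.pyGetD row (-1) "") (d.getD (PySem.List.pyGetD row (-1) "") 0 + 1))
      (PySem.Dict.empty : PySem.Dict String Int)]
  -- the common items list is nonempty
  obtain ⟨hne, -⟩ := hpre
  have hitems : (neighbors.foldl
      (fun (d : PySem.Dict String Int) (row : List String) =>
        d.insert (PySem.List.pyGetD row (-1) "") (d.getD (PySem.List.pyGetD row (-1) "") 0 + 1))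
      (PySem.Dict.empty : PySem.Dict String Int)).items ≠ [] := by
    cases neighbors with
    | nil => exact absurd rfl hne
    | cons h t =>
      simp only [List.foldl_cons]
      exact items_foldl_ne_nil t _ (by
        rw [PySem.Dict.items_insert]
        simp [PySem.Dict.contains_empty])
  set items := (neighbors.foldl
      (fun (d : PySem.Dict String Int) (row : List String) =>
        d.insert (PySem.List.pyGetD row (-1) "") (d.getD (PySem.List.pyGetD row (-1) "") 0 + 1))
      (PySem.Dict.empty : PySem.Dict String Int)).items with hit
  clear_value items
  cases items with
  | nil => exact absurd rfl hitems
  | cons p rest =>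
    have hhead := head?_sorted_rev (fun q : String × Int => q.2) p rest
    cases hsort : PySem.List.sorted (p :: rest) (fun q : String × Int => q.2) true with
    | nil => simp [hsort] at hhead
    | cons m t =>
      rw [hsort] at hhead
      simp only [List.head?_cons, Option.some.injEq] at hhead
      simp only [List.drop_succ_cons, List.drop_zero]
      rw [show PySem.List.pyGetD (m :: t) 0 ("", 0) = m by
        simp [PySem.List.pyGetD, PySem.List.pyGet?, PySem.List.pyIdx?]]
      rw [show PySem.List.pyGetD (p :: rest) 0 ("", 0) = p by
        simp [PySem.List.pyGetD, PySem.List.pyGet?, PySem.List.pyIdx?]]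
      rw [hhead]
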